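-- pv_equiv track=rewrite | github.com/alexander-stage-hoco/project-caldera | scripts/generate_dbt_models.py | get_schema_yml_snippet
-- ===== SOURCE A (Python) =====
-- def normalize_tool_name(tool_name: str) -> str:
--     """Normalize tool name for use in dbt model names.
--
--     Examples:
--         roslyn-analyzers -> roslyn
--         layout-scanner -> layout
--         git-sizer -> git_sizer
--     """
--     name = tool_name.replace("-scanner", "").replace("-analyzers", "")
--     return name.replace("-", "_")
--
-- def get_schema_yml_snippet(tool_name: str, table_name: str, models: list[str]) -> str:
--     """Generate schema.yml snippet for the models."""
--     normalized = normalize_tool_name(tool_name)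
--     lines = []
--
--     for model in models:
--         lines.append(f"  - name: {model}")
--         lines.append(f"    columns:")
--         lines.append(f"      - name: run_pk")
--         lines.append(f"        tests:")
--         lines.append(f"          - not_null")
--         if "stg_" in model:
--             lines.append(f"      - name: file_id")
--             lines.append(f"        tests:")
--             lines.append(f"          - not_null")
--             lines.append(f"      - name: relative_path")
--             lines.append(f"        tests:")
--             lines.append(f"          - not_null")
--         elif "rollup_" in model:
--             lines.append(f"      - name: directory_id")
--             lines.append(f"        tests:")
--             lines.append(f"          - not_null")
--             lines.append(f"      - name: directory_path")
--             lines.append(f"        tests:")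
--             lines.append(f"          - not_null")
--
--     return "\n".join(lines)
-- ===== SOURCE B (Python) =====
-- def normalize_tool_name(tool_name: str) -> str:
--     name = tool_name.replace("-scanner", "").replace("-analyzers", "")
--     return name.replace("-", "_")
--
-- def get_schema_yml_snippet(tool_name: str, table_name: str, models: list[str]) -> str:
--     normalized = normalize_tool_name(tool_name)
--     lines = []
--     for model in models:
--         cols = ["run_pk"]
--         if "stg_" in model:
--             cols += ["file_id", "relative_path"]
--         elif "rollup_" in model:
--             cols += ["directory_id", "directory_path"]
--         lines.append(f"  - name: {model}")
--         lines.append("    columns:")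
--         for col in cols:
--             lines.append(f"      - name: {col}")
--             lines.append("        tests:")
--             lines.append("          - not_null")
--     return "\n".join(lines)
-- ===== Notes on version B (the rewrite author's own statement) =====
-- stated objective: simpler
-- what changed: B replaces A's three duplicated hand-written emission blocks with a per-model column-name list (run_pk plus the stg_/rollup_ extras) and one uniform loop that emits the identical three-line test block for every column.
import Mathlib
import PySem

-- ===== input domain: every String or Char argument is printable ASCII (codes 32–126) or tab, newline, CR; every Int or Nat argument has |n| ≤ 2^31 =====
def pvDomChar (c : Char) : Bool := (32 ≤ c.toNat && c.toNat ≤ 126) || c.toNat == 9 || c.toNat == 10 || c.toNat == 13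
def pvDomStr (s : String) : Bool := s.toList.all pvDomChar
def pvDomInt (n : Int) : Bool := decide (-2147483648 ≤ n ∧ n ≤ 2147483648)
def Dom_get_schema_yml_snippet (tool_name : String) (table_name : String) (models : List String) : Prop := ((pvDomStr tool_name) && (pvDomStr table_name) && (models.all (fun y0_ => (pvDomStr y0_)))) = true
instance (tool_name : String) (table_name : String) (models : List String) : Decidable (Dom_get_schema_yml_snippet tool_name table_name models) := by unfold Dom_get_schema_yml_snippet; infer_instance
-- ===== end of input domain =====

-- B replaces A's three duplicated emission blocks with a per-model column list and one uniform loop (objective: simpler).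

-- shared helper (both Source A and Source B define the identical normalize_tool_name)
def normalize_tool_name (tool_name : String) : String :=
  let name := PySem.Str.replace (PySem.Str.replace tool_name "-scanner" "") "-analyzers" ""
  PySem.Str.replace name "-" "_"

-- ===== PORT A =====
def get_schema_yml_snippet (tool_name : String) (table_name : String) (models : List String) : String :=
  let _normalized := normalize_tool_name tool_name
  let lines : List String := models.foldl (fun lines model =>
    let lines := lines ++ ["  - name: " ++ model, "    columns:",
      "      - name: run_pk", "        tests:", "          - not_null"]
    if PySem.Str.isIn "stg_" model then
      lines ++ ["      - name: file_id", "        tests:", "          - not_null",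
                "      - name: relative_path", "        tests:", "          - not_null"]
    else if PySem.Str.isIn "rollup_" model then
      lines ++ ["      - name: directory_id", "        tests:", "          - not_null",
                "      - name: directory_path", "        tests:", "          - not_null"]
    else lines) []
  PySem.Str.join "\n" lines

-- ===== PORT B =====
def get_schema_yml_snippet_alt (tool_name : String) (table_name : String) (models : List String) : String :=
  let _normalized := normalize_tool_name tool_name
  let lines : List String := models.foldl (fun lines model =>
    let cols : List String := ["run_pk"] ++
      (if PySem.Str.isIn "stg_" model then ["file_id", "relative_path"]
       else if PySem.Str.isIn "rollup_" model then ["directory_id", "directory_path"]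
       else [])
    let lines := lines ++ ["  - name: " ++ model, "    columns:"]
    cols.foldl (fun lines col =>
      lines ++ ["      - name: " ++ col, "        tests:", "          - not_null"]) lines) []
  PySem.Str.join "\n" lines

-- ===== PRECONDITION & SPEC =====
def Spec_get_schema_yml_snippet (tool_name : String) (table_name : String) (models : List String) (out : String) : Prop := out = get_schema_yml_snippet_alt tool_name table_name models
instance (tool_name : String) (table_name : String) (models : List String) (out : String) : Decidable (Spec_get_schema_yml_snippet tool_name table_name models out) := by unfold Spec_get_schema_yml_snippet; infer_instance

-- ===== CLAIM (what is proved, stated in full; the proofs are below) =====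
def Claim_equal_get_schema_yml_snippet : Prop := ∀ (tool_name : String) (table_name : String) (models : List String), Dom_get_schema_yml_snippet tool_name table_name models → Spec_get_schema_yml_snippet tool_name table_name models (get_schema_yml_snippet tool_name table_name models)

-- ===== LEMMAS AND PROOFS =====

theorem pv_foldl_eq (models : List String) (acc : List String) :
    models.foldl (fun lines model =>
      let lines := lines ++ ["  - name: " ++ model, "    columns:",
        "      - name: run_pk", "        tests:", "          - not_null"]
      if PySem.Str.isIn "stg_" model then
        lines ++ ["      - name: file_id", "        tests:", "          - not_null",
                  "      - name: relative_path", "        tests:", "          - not_null"]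
      else if PySem.Str.isIn "rollup_" model then
        lines ++ ["      - name: directory_id", "        tests:", "          - not_null",
                  "      - name: directory_path", "        tests:", "          - not_null"]
      else lines) acc
    = models.foldl (fun lines model =>
      let cols : List String := ["run_pk"] ++
        (if PySem.Str.isIn "stg_" model then ["file_id", "relative_path"]
         else if PySem.Str.isIn "rollup_" model then ["directory_id", "directory_path"]
         else [])
      let lines := lines ++ ["  - name: " ++ model, "    columns:"]
      cols.foldl (fun lines col =>
        lines ++ ["      - name: " ++ col, "        tests:", "          - not_null"]) lines) acc := by
  induction models generalizing acc with
  | nil => rfl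
  | cons m ms ih =>
    simp only [List.foldl_cons]
    rw [← ih]
    congr 1
    by_cases h1 : PySem.Chars.isIn ['s', 't', 'g', '_'] m.toList = true <;>
      by_cases h2 : PySem.Chars.isIn ['r', 'o', 'l', 'l', 'u', 'p', '_'] m.toList = true <;>
        simp [PySem.Str.isIn, h1, h2, List.foldl, List.append_assoc]

-- ===== VERDICT (by name: the statement is the Claim_ definition above) =====
theorem get_schema_yml_snippet_spec : Claim_equal_get_schema_yml_snippet := by
  intro tool_name table_name models _
  unfold Spec_get_schema_yml_snippet get_schema_yml_snippet get_schema_yml_snippet_alt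
  rw [pv_foldl_eq]
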